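/- GENERATED by farm/mkstatement.py from design/units.split.tsv — do not edit.
   THE SPLIT of the proof unit `decode_residue.6` into `decode_residue.6a`, `decode_residue.6b`: the children's statements give the parent's
   UNCHANGED statement (so nothing above the parent — callers, compositions — is touched by the split). -/
import Vorbis.Spec.DecodeResidue46
import Vorbis.Spec.Units.decode_residue_6
import Vorbis.Spec.Units.decode_residue_6a
import Vorbis.Spec.Units.decode_residue_6b
namespace Vorbis.Spec.Splits
open X86 X86.User Asan

/-- The children of the split unit `decode_residue.6` prove it, by `Vorbis.Spec.DecodeResidue.Seg6.of_parts`. -/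
theorem decode_residue_6
    (h_decode_residue_6a : Vorbis.Spec.decode_residue_6a.Statement)
    (h_decode_residue_6b : Vorbis.Spec.decode_residue_6b.Statement) :
    Vorbis.Spec.decode_residue_6.Statement := by
  intro Lay _hLay μ _hμ u₀ _hcode _h_asan_load8_noabort _h_codebook_decode_deinterleave_repeat _h_asan_load4_noabort _h_asan_load1_noabort _h_asan_load2_noabort
  apply Vorbis.Spec.DecodeResidue.Seg6.of_parts
  · exact h_decode_residue_6a Lay _hLay μ _hμ u₀ _hcode _h_asan_load4_noabort
  · exact h_decode_residue_6b Lay _hLay μ _hμ u₀ _hcode _h_asan_load8_noabort _h_codebook_decode_deinterleave_repeat _h_asan_load4_noabort _h_asan_load1_noabort _h_asan_load2_noabort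

end Vorbis.Spec.Splits
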